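-- pv_equiv track=rewrite | github.com/Jason272001/finance_tracker | backend/main.py | _parse_stripe_signature
-- ===== SOURCE A (Python) =====
-- from typing import Optional
--
-- def _parse_stripe_signature(sig_header: str) -> tuple[Optional[int], Optional[str]]:
--     if not sig_header:
--         return None, None
--     ts = None
--     v1 = None
--     for chunk in str(sig_header).split(","):
--         k, _, v = chunk.partition("=")
--         if k == "t":
--             try:
--                 ts = int(v)
--             except Exception:
--                 ts = None
--         elif k == "v1":
--             v1 = v
--     return ts, v1
-- ===== SOURCE B (Python) =====
-- from typing import Optional
--
-- def _parse_stripe_signature(sig_header: str) -> tuple[Optional[int], Optional[str]]: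
--     if not sig_header:
--         return None, None
--     chunks = str(sig_header).split(",")
--
--     def last_value(key):
--         # scan back-to-front, stop at the first (i.e. last-in-header) match
--         for chunk in reversed(chunks):
--             k, _, v = chunk.partition("=")
--             if k == key:
--                 return v
--         return None
--
--     v1 = last_value("v1")
--     t = last_value("t")
--     if t is None:
--         return None, v1
--     try:
--         ts = int(t)
--     except Exception:
--         ts = None
--     return ts, v1
-- ===== Notes on version B (the rewrite author's own statement) =====
-- stated objective: alternative
-- what changed: A makes one forward pass mutating ts/v1 slots so the last occurrence wins; B instead scans the chunk list back-to-front twice with early exit, returning the first match per key, and parses the int afterwards.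
import Mathlib
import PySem

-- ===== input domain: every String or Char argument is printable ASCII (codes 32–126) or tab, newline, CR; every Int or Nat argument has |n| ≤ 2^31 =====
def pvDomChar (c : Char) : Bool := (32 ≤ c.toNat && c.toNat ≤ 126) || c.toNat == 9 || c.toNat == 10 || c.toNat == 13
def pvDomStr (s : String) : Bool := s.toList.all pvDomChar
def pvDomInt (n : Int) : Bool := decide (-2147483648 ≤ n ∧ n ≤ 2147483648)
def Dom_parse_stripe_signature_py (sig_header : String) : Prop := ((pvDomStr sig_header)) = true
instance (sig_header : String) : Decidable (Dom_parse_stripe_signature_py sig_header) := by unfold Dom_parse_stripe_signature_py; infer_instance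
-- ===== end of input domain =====

-- B scans the chunk list back-to-front twice with early exit (first match per key) instead of
-- A's forward last-wins mutation pass; objective: alternative traversal, same cost.

-- shared helper: chunk.partition("=") on code points — exact: (before, sep, after), sep = [] iff '=' absent
def pvPartitionEq : List Char → List Char × List Char × List Char
  | [] => ([], [], [])
  | c :: rest =>
    if c = '=' then ([], ['='], rest)
    else
      let (a, m, b) := pvPartitionEq rest
      (c :: a, m, b)

-- ===== PORT A =====
def parse_stripe_signature_py (sig_header : String) : Option Int × Option String :=
  if sig_header = "" then (none, none)
  else
    (PySem.Chars.splitOn sig_header.toList [',']).foldl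
      (fun st chunk =>
        let (k, _, v) := pvPartitionEq chunk
        if k = ['t'] then (PySem.Int.ofChars? v, st.2)
        else if k = ['v', '1'] then (st.1, some (String.ofList v))
        else st)
      (none, none)

-- ===== PORT B =====
-- B's `for chunk in reversed(chunks): … return v` loop: first match over the reversed list
def pvFindVal (key : List Char) : List (List Char) → Option (List Char)
  | [] => none
  | c :: rest =>
    let (k, _, v) := pvPartitionEq c
    if k = key then some v else pvFindVal key rest

def parse_stripe_signature_py_alt (sig_header : String) : Option Int × Option String :=
  if sig_header = "" then (none, none)
  else
    let chunks := (PySem.Chars.splitOn sig_header.toList [',']).reverse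
    let v1 := (pvFindVal ['v', '1'] chunks).map (fun v => String.ofList v)
    match pvFindVal ['t'] chunks with
    | none => (none, v1)
    | some t => (PySem.Int.ofChars? t, v1)

-- ===== PRECONDITION & SPEC =====
def Spec_parse_stripe_signature_py (sig_header : String) (out : Option Int × Option String) : Prop := out = parse_stripe_signature_py_alt sig_header
instance (sig_header : String) (out : Option Int × Option String) : Decidable (Spec_parse_stripe_signature_py sig_header out) := by unfold Spec_parse_stripe_signature_py; infer_instance

-- ===== CLAIM (what is proved, stated in full; the proofs are below) =====
def Claim_equal_parse_stripe_signature_py : Prop := ∀ (sig_header : String), Dom_parse_stripe_signature_py sig_header → Spec_parse_stripe_signature_py sig_header (parse_stripe_signature_py sig_header)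

-- ===== LEMMAS AND PROOFS =====

theorem pvFindVal_append (key : List Char) (cs ds : List (List Char)) :
    pvFindVal key (cs ++ ds) =
      match pvFindVal key cs with
      | some x => some x
      | none => pvFindVal key ds := by
  induction cs with
  | nil => simp [pvFindVal]
  | cons c rest ih =>
    simp only [List.cons_append, pvFindVal]
    obtain ⟨k, m, v⟩ := pvPartitionEq c
    by_cases h : k = key <;> simp [h, ih]

theorem pvFold_eq (cs : List (List Char)) (st : Option Int × Option String) :
    cs.foldl
      (fun st chunk =>
        let (k, _, v) := pvPartitionEq chunk
        if k = ['t'] then (PySem.Int.ofChars? v, st.2)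
        else if k = ['v', '1'] then (st.1, some (String.ofList v))
        else st)
      st
    = ((match pvFindVal ['t'] cs.reverse with
        | none => st.1
        | some t => PySem.Int.ofChars? t),
       (match pvFindVal ['v', '1'] cs.reverse with
        | none => st.2
        | some v => some (String.ofList v))) := by
  induction cs generalizing st with
  | nil => simp [pvFindVal]
  | cons c rest ih =>
    simp only [List.foldl_cons, List.reverse_cons]
    rw [ih, pvFindVal_append ['t'] rest.reverse [c],
        pvFindVal_append ['v', '1'] rest.reverse [c]]
    rcases e : pvPartitionEq c with ⟨k, m, v⟩
    simp only [pvFindVal, e]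
    by_cases ht : k = ['t']
    · subst ht
      cases pvFindVal ['t'] rest.reverse <;> cases pvFindVal ['v', '1'] rest.reverse <;> simp
    · by_cases hv : k = ['v', '1']
      · subst hv
        cases pvFindVal ['t'] rest.reverse <;> cases pvFindVal ['v', '1'] rest.reverse <;>
          simp [ht]
      · cases pvFindVal ['t'] rest.reverse <;> cases pvFindVal ['v', '1'] rest.reverse <;>
          simp [ht, hv]

-- ===== VERDICT (by name: the statement is the Claim_ definition above) =====
theorem parse_stripe_signature_py_spec : Claim_equal_parse_stripe_signature_py := by
  intro s _
  unfold Spec_parse_stripe_signature_py parse_stripe_signature_py parse_stripe_signature_py_alt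
  by_cases h : s = ""
  · simp [h]
  · simp only [h, if_false]
    rw [pvFold_eq]
    cases pvFindVal ['t'] (PySem.Chars.splitOn s.toList [',']).reverse <;>
      cases pvFindVal ['v', '1'] (PySem.Chars.splitOn s.toList [',']).reverse <;> rfl
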